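-- pv_equiv track=rewrite | github.com/milind-prajapat/Rubiks-Cube | Rubicks_Cube.py | AntiClockwise
-- ===== SOURCE A (Python) =====
-- def AntiClockwise(Face):
--     List =  [[0, 0, 0],
--              [0, 0, 0],
--              [0, 0, 0]]
--
--     for i in range(3):
--         for j in range(3):
--             List[i][j] = Face[j][2-i]
--
--     return List
-- ===== SOURCE B (Python) =====
-- def AntiClockwise(Face):
--     # Classic border-ring cycling: list the 8 border cells clockwise from the
--     # top-left corner; an anticlockwise quarter turn shifts this ring by two
--     # positions; the center cell stays put.
--     ring = [Face[0][0], Face[0][1], Face[0][2], Face[1][2],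
--             Face[2][2], Face[2][1], Face[2][0], Face[1][0]]
--     r = ring[2:] + ring[:2]
--     return [[r[0], r[1], r[2]],
--             [r[7], Face[1][1], r[3]],
--             [r[6], r[5], r[4]]]
-- ===== Notes on version B (the rewrite author's own statement) =====
-- stated objective: alternative
-- what changed: Replaces A's double loop writing target[i][j] = Face[j][2-i] into a preallocated zero grid with the border-ring cycling trick: read the 8 border cells clockwise into a ring, rotate the ring by two positions (ring[2:]+ring[:2]), and rebuild the face around the unchanged center cell.
import Mathlib
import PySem

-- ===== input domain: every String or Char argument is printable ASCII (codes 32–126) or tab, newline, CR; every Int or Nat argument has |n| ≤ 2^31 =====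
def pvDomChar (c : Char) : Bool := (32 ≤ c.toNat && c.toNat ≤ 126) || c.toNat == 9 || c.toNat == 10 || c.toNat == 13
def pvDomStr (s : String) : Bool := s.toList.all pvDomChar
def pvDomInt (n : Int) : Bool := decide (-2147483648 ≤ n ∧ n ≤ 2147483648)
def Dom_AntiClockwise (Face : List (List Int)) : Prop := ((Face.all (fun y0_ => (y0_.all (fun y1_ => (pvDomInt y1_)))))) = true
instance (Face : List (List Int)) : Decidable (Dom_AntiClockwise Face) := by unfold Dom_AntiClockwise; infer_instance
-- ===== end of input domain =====

-- B replaces A's double loop (target[i][j] = Face[j][2-i] into a zero grid) with the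
-- border-ring cycling trick: rotate the 8 border cells by two positions around the fixed
-- center (alternative algorithm, same cost). Proved equal on all inputs where A returns.


-- ===== PORT A =====
-- A: start from a 3x3 zero grid, set List[i][j] = Face[j][2-i] for i, j in range(3)
def AntiClockwise (Face : List (List Int)) : List (List Int) :=
  let L0 : List (List Int) := [[0, 0, 0], [0, 0, 0], [0, 0, 0]]
  (PySem.List.pyRange 0 3 1).foldl (fun L i =>
    (PySem.List.pyRange 0 3 1).foldl (fun L j =>
      PySem.List.pySetD L i
        (PySem.List.pySetD (PySem.List.pyGetD L i []) j
          (PySem.List.pyGetD (PySem.List.pyGetD Face j []) (2 - i) 0))) L) L0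

-- ===== PORT B =====
-- B: ring = 8 border cells clockwise; r = ring[2:] + ring[:2]; rebuild around Face[1][1]
def AntiClockwise_alt (Face : List (List Int)) : List (List Int) :=
  let g : Int → Int → Int := fun i j => PySem.List.pyGetD (PySem.List.pyGetD Face i []) j 0
  let ring : List Int := [g 0 0, g 0 1, g 0 2, g 1 2, g 2 2, g 2 1, g 2 0, g 1 0]
  let r : List Int := PySem.List.slice ring (some 2) none ++ PySem.List.slice ring none (some 2)
  let q : Int → Int := fun k => PySem.List.pyGetD r k 0
  [[q 0, q 1, q 2],
   [q 7, g 1 1, q 3],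
   [q 6, q 5, q 4]]

-- ===== PRECONDITION & SPEC =====
-- Pre_ excludes exactly the inputs where A raises IndexError: fewer than 3 rows, or one of the
-- first 3 rows shorter than 3.
def Pre_AntiClockwise (Face : List (List Int)) : Prop :=
  3 ≤ Face.length ∧ ∀ r ∈ Face.take 3, 3 ≤ r.length
instance (Face : List (List Int)) : Decidable (Pre_AntiClockwise Face) := by
  unfold Pre_AntiClockwise; infer_instance

def pvWitness_AntiClockwise : List (List Int) :=
  [[1, 2, 3], [4, 5, 6], [7, 8, 9]]

def Spec_AntiClockwise (Face : List (List Int)) (out : List (List Int)) : Prop := out = AntiClockwise_alt Face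
instance (Face : List (List Int)) (out : List (List Int)) : Decidable (Spec_AntiClockwise Face out) := by unfold Spec_AntiClockwise; infer_instance

-- ===== CLAIM (what is proved, stated in full; the proofs are below) =====
def Claim_equal_AntiClockwise : Prop := ∀ (Face : List (List Int)), Dom_AntiClockwise Face → Pre_AntiClockwise Face → Spec_AntiClockwise Face (AntiClockwise Face)

-- ===== LEMMAS AND PROOFS =====

-- Python indexing on cons cells with a symbolic tail (numeral indices 0, 1, 2)
theorem pvGet0 {α : Type} (x : α) (t : List α) (d : α) : PySem.List.pyGetD (x::t) 0 d = x :=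
  PySem.List.pyGetD_zero_cons ..
theorem pvGet1 {α : Type} (x0 x1 : α) (t : List α) (d : α) : PySem.List.pyGetD (x0::x1::t) 1 d = x1 := by
  have h : PySem.List.pyIdx? (t.length + 1 + 1) 1 = some 1 := by simp [PySem.List.pyIdx?]
  simp [PySem.List.pyGetD, PySem.List.pyGet?, h]
theorem pvGet2 {α : Type} (x0 x1 x2 : α) (t : List α) (d : α) : PySem.List.pyGetD (x0::x1::x2::t) 2 d = x2 := by
  have h : PySem.List.pyIdx? (t.length + 1 + 1 + 1) 2 = some 2 := by simp [PySem.List.pyIdx?]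
  simp [PySem.List.pyGetD, PySem.List.pyGet?, h]
theorem pvSet0 {α : Type} (x : α) (t : List α) (v : α) : PySem.List.pySetD (x::t) 0 v = v::t := by
  have h : PySem.List.pyIdx? (t.length + 1) 0 = some 0 := by simp [PySem.List.pyIdx?]
  simp [PySem.List.pySetD, PySem.List.pySet?, h]
theorem pvSet1 {α : Type} (x0 x1 : α) (t : List α) (v : α) : PySem.List.pySetD (x0::x1::t) 1 v = x0::v::t := by
  have h : PySem.List.pyIdx? (t.length + 1 + 1) 1 = some 1 := by simp [PySem.List.pyIdx?]
  simp [PySem.List.pySetD, PySem.List.pySet?, h]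
theorem pvSet2 {α : Type} (x0 x1 x2 : α) (t : List α) (v : α) : PySem.List.pySetD (x0::x1::x2::t) 2 v = x0::x1::v::t := by
  have h : PySem.List.pyIdx? (t.length + 1 + 1 + 1) 2 = some 2 := by simp [PySem.List.pyIdx?]
  simp [PySem.List.pySetD, PySem.List.pySet?, h]

-- ===== VERDICT (by name: the statement is the Claim_ definition above) =====
theorem AntiClockwise_spec : Claim_equal_AntiClockwise := by
  intro Face _ hpre
  obtain ⟨hlen, hrows⟩ := hpre
  match Face, hlen, hrows with
  | (r0 :: r1 :: r2 :: rest), _, hrows =>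
    have h0 : 3 ≤ r0.length := hrows r0 (by simp)
    have h1 : 3 ≤ r1.length := hrows r1 (by simp)
    have h2 : 3 ≤ r2.length := hrows r2 (by simp)
    match r0, h0, r1, h1, r2, h2 with
    | (a0 :: a1 :: a2 :: t0), _, (b0 :: b1 :: b2 :: t1), _, (c0 :: c1 :: c2 :: t2), _ =>
      show Spec_AntiClockwise _ _
      unfold Spec_AntiClockwise AntiClockwise AntiClockwise_alt
      simp only [show PySem.List.pyRange 0 3 1 = [0, 1, 2] from rfl, List.foldl_cons,
        List.foldl_nil, pvGet0, pvGet1, pvGet2, pvSet0, pvSet1, pvSet2]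
      simp only [show (2:Int)-0 = 2 from rfl, show (2:Int)-1 = 1 from rfl,
        show (2:Int)-2 = 0 from rfl, pvGet0, pvGet1, pvGet2]
      rfl
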